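-- pv_equiv track=rewrite | github.com/miouzikal/binance_coins | binance_coins.py | get_all_coins_combinations
-- ===== SOURCE A (Python) =====
-- import itertools as it
--
-- def get_all_coins_combinations(coin_list):
--     filtered_coin_list = []
--     combinations = []
--
--     for coin in coin_list:
--         filtered_coin_list.append(coin)
--
--     for combination in list(it.product(filtered_coin_list, repeat=2)):
--         if(combination[0] != combination[1]):
--             combinations.append(combination)
--
--     output = set(map(lambda x: tuple(sorted(x)), combinations))
--
--     return output
-- ===== SOURCE B (Python) =====
-- def get_all_coins_combinations(coin_list):
--     result = set()
--     rest = list(coin_list)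
--     while rest:
--         a = rest.pop(0)
--         for b in rest:
--             if a != b:
--                 result.add((a, b) if a < b else (b, a))
--     return result
-- ===== Notes on version B (the rewrite author's own statement) =====
-- stated objective: alternative
-- what changed: A materialises the full n-squared ordered-pair product, filters equal pairs, sorts each pair and dedups at the end via set(map(...)); B instead does one triangular scan visiting each unordered index pair once, canonicalises each pair with a single comparison and inserts it into the result set as it goes (no product list, no per-pair sorted(), no post-hoc dedup pass).
import Mathlib
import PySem

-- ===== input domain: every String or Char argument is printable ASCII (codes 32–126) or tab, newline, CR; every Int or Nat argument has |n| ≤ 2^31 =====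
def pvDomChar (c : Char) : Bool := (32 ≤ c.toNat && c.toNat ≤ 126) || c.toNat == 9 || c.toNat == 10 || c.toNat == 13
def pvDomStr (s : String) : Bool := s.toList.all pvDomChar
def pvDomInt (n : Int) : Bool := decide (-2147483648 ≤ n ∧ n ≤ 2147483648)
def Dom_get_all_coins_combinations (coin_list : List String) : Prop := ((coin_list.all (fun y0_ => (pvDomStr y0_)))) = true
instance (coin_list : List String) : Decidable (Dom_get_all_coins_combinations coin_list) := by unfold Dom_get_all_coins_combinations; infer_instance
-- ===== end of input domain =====

-- B replaces A's full ordered-pair product + per-pair sort + posterior set-dedup by a single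
-- triangular scan that canonicalises each pair directly while building the set (alternative algorithm).

-- ===== PORT A =====
def get_all_coins_combinations (coin_list : List String) : List (String × String) :=
  -- for coin in coin_list: filtered_coin_list.append(coin)
  let filtered_coin_list := coin_list.foldl (fun acc coin => acc ++ [coin]) []
  -- list(it.product(filtered_coin_list, repeat=2))
  let prod := filtered_coin_list.flatMap (fun x => filtered_coin_list.map (fun y => (x, y)))
  -- for combination in …: if combination[0] != combination[1]: combinations.append(combination)
  let combinations := prod.foldl
    (fun acc combination => if combination.1 ≠ combination.2 then acc ++ [combination] else acc) []
  -- set(map(lambda x: tuple(sorted(x)), combinations)); tuple(sorted(x)) on a 2-tuple puts it in nondecreasing order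
  PySem.Set.ofList (combinations.map (fun x => if x.1 ≤ x.2 then (x.1, x.2) else (x.2, x.1)))

-- ===== PORT B =====
-- inner 'for b in rest: if a != b: result.add((a, b) if a < b else (b, a))'
def pvAltInner (a : String) (rest : List String) (s : PySem.Set (String × String)) :
    PySem.Set (String × String) :=
  rest.foldl (fun s b => if a ≠ b then PySem.Set.add s (if a < b then (a, b) else (b, a)) else s) s

-- outer 'while rest: a = rest.pop(0); …'
def pvAltGo : List String → PySem.Set (String × String) → PySem.Set (String × String)
  | [], s => s
  | a :: rest, s => pvAltGo rest (pvAltInner a rest s)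

def get_all_coins_combinations_alt (coin_list : List String) : List (String × String) :=
  pvAltGo coin_list PySem.Set.empty

-- ===== PRECONDITION & SPEC =====
def Spec_get_all_coins_combinations (coin_list : List String) (out : List (String × String)) : Prop := out = get_all_coins_combinations_alt coin_list
instance (coin_list : List String) (out : List (String × String)) : Decidable (Spec_get_all_coins_combinations coin_list out) := by unfold Spec_get_all_coins_combinations; infer_instance

-- ===== CLAIM (what is proved, stated in full; the proofs are below) =====
def Claim_equal_get_all_coins_combinations : Prop := ∀ (coin_list : List String), Dom_get_all_coins_combinations coin_list → Spec_get_all_coins_combinations coin_list (get_all_coins_combinations coin_list)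

-- ===== LEMMAS AND PROOFS =====

-- the canonical (sorted) form of a pair, and the list of canonical pairs a row / the triangle produces
def pvCanon (a b : String) : String × String := if a < b then (a, b) else (b, a)

def pvRow (a : String) (t : List String) : List (String × String) :=
  t.filterMap (fun y => if a ≠ y then some (pvCanon a y) else none)

def pvTri : List String → List (String × String)
  | [] => []
  | a :: r => pvRow a r ++ pvTri r

theorem pvCanon_comm (a b : String) : pvCanon a b = pvCanon b a := by
  unfold pvCanon
  rcases lt_trichotomy a b with h | h | h
  · simp [h, not_lt_of_gt h]
  · simp [h]
  · simp [h, not_lt_of_gt h]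

theorem pvRow_cons (a x : String) (t : List String) :
    pvRow a (x :: t) = (if a ≠ x then [pvCanon a x] else []) ++ pvRow a t := by
  by_cases h : a = x <;> simp [pvRow, h]

-- A's inner map∘filter over one row equals pvRow
theorem pvRowA (x : String) (l : List String) :
    ((l.map (fun y => (x, y))).filter (fun c => decide (c.1 ≠ c.2))).map
        (fun c => if c.1 ≤ c.2 then (c.1, c.2) else (c.2, c.1)) = pvRow x l := by
  induction l with
  | nil => simp [pvRow]
  | cons y t ih =>
    rw [List.map_cons, List.filter_cons]
    by_cases h : x = y
    · rw [if_neg (by simp [h]), pvRow_cons, if_neg (by simp [h]), List.nil_append]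
      exact ih
    · rw [if_pos (by simp [h]), List.map_cons, pvRow_cons, if_pos h, List.singleton_append]
      have hc : (if x ≤ y then (x, y) else (y, x)) = pvCanon x y := by
        unfold pvCanon
        rcases lt_trichotomy x y with h' | h' | h'
        · simp [le_of_lt h', h']
        · exact absurd h' h
        · simp [not_le_of_gt h', not_lt_of_gt h']
      rw [ih]
      exact congrArg (· :: pvRow x t) hc

-- B's inner loop is an update with pvRow
theorem pvAltInner_eq (a : String) :
    ∀ (rest : List String) (s : PySem.Set (String × String)),
      pvAltInner a rest s = PySem.Set.update s (pvRow a rest) := by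
  intro rest
  induction rest with
  | nil => intro s; simp [pvAltInner, pvRow, PySem.Set.update]
  | cons b t ih =>
    intro s
    by_cases h : a = b
    · simpa [pvAltInner, pvRow_cons, h] using ih s
    · have := ih (PySem.Set.add s (pvCanon a b))
      simpa [pvAltInner, pvRow_cons, h, PySem.Set.update_cons, pvCanon] using
        ih (PySem.Set.add s (if a < b then (a, b) else (b, a)))

-- B computes update with the triangle list
theorem pvAltGo_eq :
    ∀ (l : List String) (s : PySem.Set (String × String)),
      pvAltGo l s = PySem.Set.update s (pvTri l) := by
  intro l
  induction l with
  | nil => intro s; simp [pvAltGo, pvTri, PySem.Set.update]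
  | cons a r ih =>
    intro s
    simp [pvAltGo, pvAltInner_eq, pvTri, PySem.Set.update_append, ih]

theorem pvUpdate_of_mem {β : Type} [BEq β] [LawfulBEq β] :
    ∀ (ys : List β) (s : PySem.Set β), (∀ p ∈ ys, p ∈ s) → PySem.Set.update s ys = s := by
  intro ys
  induction ys with
  | nil => intro s _; rfl
  | cons y t ih =>
    intro s h
    rw [PySem.Set.update_cons, PySem.Set.add_of_mem (h y (by simp))]
    exact ih s (fun p hp => h p (by simp [hp]))

-- elements already in the set can be dropped from the front of each chunk of an update
theorem pvUpdate_absorb {α β : Type} [BEq β] [LawfulBEq β] (f gx : α → List β) :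
    ∀ (t : List α) (s : PySem.Set β), (∀ x ∈ t, ∀ p ∈ gx x, p ∈ s) →
      PySem.Set.update s (t.flatMap (fun x => gx x ++ f x)) =
      PySem.Set.update s (t.flatMap f) := by
  intro t
  induction t with
  | nil => intro s _; rfl
  | cons x t ih =>
    intro s h
    rw [List.flatMap_cons, List.flatMap_cons, PySem.Set.update_append,
        PySem.Set.update_append, PySem.Set.update_append,
        pvUpdate_of_mem (gx x) s (h x (by simp))]
    exact ih (PySem.Set.update s (f x))
      (fun y hy p hp => (PySem.Set.mem_update _ _ _).mpr (Or.inl (h y (by simp [hy]) p hp)))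

-- the central fact: updating with the full square of rows equals updating with the triangle
theorem pvSquare_eq_tri :
    ∀ (l : List String) (s : PySem.Set (String × String)),
      PySem.Set.update s (l.flatMap (fun x => pvRow x l)) = PySem.Set.update s (pvTri l) := by
  intro l
  induction l with
  | nil => intro s; rfl
  | cons a r ih =>
    intro s
    have hrowa : pvRow a (a :: r) = pvRow a r := by simp [pvRow_cons]
    have hrow : ∀ x, pvRow x (a :: r) = (if x ≠ a then [pvCanon a x] else []) ++ pvRow x r := by
      intro x; rw [pvRow_cons, pvCanon_comm]
    rw [List.flatMap_cons, hrowa, PySem.Set.update_append]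
    have habs :
        PySem.Set.update (PySem.Set.update s (pvRow a r)) (r.flatMap (fun x => pvRow x (a :: r))) =
        PySem.Set.update (PySem.Set.update s (pvRow a r)) (r.flatMap (fun x => pvRow x r)) := by
      have := pvUpdate_absorb (fun x => pvRow x r)
        (fun x => if x ≠ a then [pvCanon a x] else []) r (PySem.Set.update s (pvRow a r))
        (by
          intro x hx p hp
          by_cases hxa : x = a
          · simp [hxa] at hp
          · simp [hxa] at hp
            subst hp
            refine (PySem.Set.mem_update _ _ _).mpr (Or.inr ?_)
            simp only [pvRow, List.mem_filterMap]
            exact ⟨x, hx, by simp [Ne.symm hxa]⟩)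
      calc PySem.Set.update (PySem.Set.update s (pvRow a r)) (r.flatMap (fun x => pvRow x (a :: r)))
          = PySem.Set.update (PySem.Set.update s (pvRow a r))
              (r.flatMap (fun x => (if x ≠ a then [pvCanon a x] else []) ++ pvRow x r)) := by
            congr 1; exact List.flatMap_congr (fun x _ => hrow x)
        _ = _ := this
    rw [habs, ih, pvTri, PySem.Set.update_append]

theorem pvFoldl_append_id (l : List String) :
    l.foldl (fun acc coin => acc ++ [coin]) [] = l := by
  have := PySem.List.foldl_append_eq_flatMap (g := fun c => [c]) (l := l) (acc := [])
  simpa using this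

-- ===== VERDICT (by name: the statement is the Claim_ definition above) =====
theorem get_all_coins_combinations_spec : Claim_equal_get_all_coins_combinations := by
  intro coin_list _
  unfold Spec_get_all_coins_combinations get_all_coins_combinations get_all_coins_combinations_alt
  dsimp only
  rw [pvFoldl_append_id, PySem.List.foldl_append_ite_eq_filter, pvAltGo_eq]
  rw [List.nil_append, List.filter_flatMap, List.map_flatMap]
  have : (coin_list.flatMap fun x =>
      ((coin_list.map (fun y => (x, y))).filter (fun c => decide (c.1 ≠ c.2))).map
        (fun c => if c.1 ≤ c.2 then (c.1, c.2) else (c.2, c.1)))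
      = coin_list.flatMap (fun x => pvRow x coin_list) :=
    List.flatMap_congr (fun x _ => pvRowA x coin_list)
  rw [this, ← PySem.Set.update_nil_left, pvSquare_eq_tri]
  rfl
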